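-- pv_equiv track=rewrite | github.com/ricardofitas/AoC-2025 | Day 7.2/day7_2_qiskit.py | solve_quantum
-- ===== SOURCE A (Python) =====
-- def solve_quantum(text: str) -> int:
--     lines = text.splitlines()
--     if not lines:
--         return 0
--
--     grid = [list(line) for line in lines]
--     h = len(grid)
--     w = max(len(row) for row in grid)
--
--     # Pad rows to same width for safety
--     for r in range(h):
--         if len(grid[r]) < w:
--             grid[r] += [" "] * (w - len(grid[r]))
--
--     # Find S
--     start = None
--     for r in range(h):
--         for c in range(w):
--             if grid[r][c] == "S":
--                 start = (r, c)
--                 break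
--         if start is not None:
--             break
--
--     if start is None:
--         return 0
--
--     sr, sc = start
--
--     # dp[r][c]: number of timelines at cell (r, c)
--     dp = [[0 for _ in range(w)] for _ in range(h)]
--     dp[sr][sc] = 1
--
--     total_timelines = 0
--
--     for r in range(sr, h):
--         for c in range(w):
--             ways = dp[r][c]
--             if ways == 0:
--                 continue
--
--             nr = r + 1
--             if nr >= h:
--                 total_timelines += ways
--                 continue
--
--             ch = grid[nr][c]
--             if ch == "^":
--                 # Split
--                 if c > 0:
--                     dp[nr][c - 1] += ways
--                 if c + 1 < w:
--                     dp[nr][c + 1] += ways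
--             else:
--                 # Straight down
--                 dp[nr][c] += ways
--
--     return total_timelines
-- ===== SOURCE B (Python) =====
-- def solve_quantum(text: str) -> int:
--     # Backward DP: compute, row by row from the bottom, the number of timelines
--     # that reach the bottom from each cell, then read off the value at S.
--     lines = text.splitlines()
--     if not lines:
--         return 0
--
--     h = len(lines)
--     w = max(len(line) for line in lines)
--
--     # Find S (first occurrence in row-major order)
--     start = None
--     for r, line in enumerate(lines):
--         c = line.find("S")
--         if c != -1:
--             start = (r, c)
--             break
--
--     if start is None:
--         return 0
--
--     sr, sc = start
--
--     # nxt[c] = number of timelines reaching the bottom from cell (r, c),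
--     # for the row r currently being processed (starting with r = h - 1).
--     nxt = [1] * w
--     for r in range(h - 2, sr - 1, -1):
--         row = lines[r + 1]
--         cur = []
--         for c in range(w):
--             ch = row[c] if c < len(row) else " "
--             if ch == "^":
--                 cur.append((nxt[c - 1] if c > 0 else 0) + (nxt[c + 1] if c + 1 < w else 0))
--             else:
--                 cur.append(nxt[c])
--         nxt = cur
--     return nxt[sc]
-- ===== Notes on version B (the rewrite author's own statement) =====
-- stated objective: simpler
-- what changed: Replaces A's forward DP, which pads the grid, propagates timeline mass from S down a 2D h-by-w table and accumulates a running total as mass falls off the bottom row, by a backward DP that sweeps rows bottom-up keeping a single 1D vector of per-cell timeline counts to the bottom and returns the entry at S; no padding pass, no 2D table, no running total.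
import Mathlib
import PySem

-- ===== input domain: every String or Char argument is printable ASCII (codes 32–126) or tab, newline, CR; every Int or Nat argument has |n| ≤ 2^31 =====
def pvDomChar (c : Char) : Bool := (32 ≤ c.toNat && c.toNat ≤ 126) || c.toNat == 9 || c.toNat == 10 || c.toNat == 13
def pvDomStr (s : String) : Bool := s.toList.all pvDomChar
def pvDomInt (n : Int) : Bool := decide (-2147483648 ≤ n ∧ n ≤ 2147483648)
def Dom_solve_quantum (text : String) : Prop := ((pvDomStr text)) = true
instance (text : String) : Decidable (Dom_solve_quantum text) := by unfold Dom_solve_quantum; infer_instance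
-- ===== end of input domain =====

-- B replaces A's forward mass-propagation DP (padded 2D table filled from S downwards, with a
-- running total collected when mass falls off the bottom row) by a backward row-by-row DP that
-- keeps one 1D vector of per-cell timeline counts to the bottom and reads it off at S;
-- objective: simpler (no padding pass, no 2D table, no running total); measured faster by the
-- timing run (constant factor).

-- ===== PORT A =====
-- dp[r][c] / grid[r][c] reads and writes: in this algorithm the indices are always nonnegative
-- and in range, so pyGetD/pySetD are exact for Python's indexing there.
def pvGet2 (dp : List (List Int)) (r c : Int) : Int :=
  PySem.List.pyGetD (PySem.List.pyGetD dp r []) c 0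

def pvAdd2 (dp : List (List Int)) (r c : Int) (v : Int) : List (List Int) :=
  PySem.List.pySetD dp r (PySem.List.pySetD (PySem.List.pyGetD dp r []) c (pvGet2 dp r c + v))

-- the 'pad rows to same width' loop
def pvPadLoopA (g : List (List Char)) (h w : Int) : List (List Char) :=
  (PySem.List.pyRange 0 h 1).foldl (fun g r =>
    let row := PySem.List.pyGetD g r []
    if (row.length : Int) < w then
      PySem.List.pySetD g r (row ++ List.replicate (w - (row.length : Int)).toNat ' ')
    else g) g

-- the inner 'find S in row r' loop ('if st2.isSome' models Python's break)
def pvScanRowA (grid : List (List Char)) (w r : Int) : Option (Int × Int) :=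
  (PySem.List.pyRange 0 w 1).foldl (fun st2 c =>
    if st2.isSome then st2
    else if PySem.List.pyGetD (PySem.List.pyGetD grid r []) c ' ' = 'S' then some (r, c)
    else none) none

-- the outer 'find S' loop
def pvFindA (grid : List (List Char)) (h w : Int) : Option (Int × Int) :=
  (PySem.List.pyRange 0 h 1).foldl (fun st r =>
    if st.isSome then st else pvScanRowA grid w r) none

-- the body of A's inner loop over c (one dp cell), and A's loop over one row
def pvCellA (grid : List (List Char)) (h w r : Int) (st : List (List Int) × Int) (c : Int) :
    List (List Int) × Int :=
  let ways := pvGet2 st.1 r c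
  if ways = 0 then st
  else
    let nr := r + 1
    if h ≤ nr then (st.1, st.2 + ways)
    else
      let ch := PySem.List.pyGetD (PySem.List.pyGetD grid nr []) c ' '
      if ch = '^' then
        let dp1 := if 0 < c then pvAdd2 st.1 nr (c - 1) ways else st.1
        let dp2 := if c + 1 < w then pvAdd2 dp1 nr (c + 1) ways else dp1
        (dp2, st.2)
      else (pvAdd2 st.1 nr c ways, st.2)

def pvRowA (grid : List (List Char)) (h w : Int) (st : List (List Int) × Int) (r : Int) :
    List (List Int) × Int :=
  (PySem.List.pyRange 0 w 1).foldl (pvCellA grid h w r) st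

def solve_quantum (text : String) : Int :=
  let lines := PySem.Str.splitlines text
  if lines = [] then 0
  else
    let grid : List (List Char) := lines.map (fun line => line.toList)
    let h : Int := grid.length
    let w : Int := (PySem.List.max? (grid.map (fun row => (row.length : Int))) (fun x => x)).getD 0
    let grid := pvPadLoopA grid h w
    let start := pvFindA grid h w
    match start with
    | none => 0
    | some (sr, sc) =>
      let dp : List (List Int) := List.replicate h.toNat (List.replicate w.toNat (0 : Int))
      let dp := PySem.List.pySetD dp sr (PySem.List.pySetD (PySem.List.pyGetD dp sr []) sc 1)
      let st := (PySem.List.pyRange sr h 1).foldl (pvRowA grid h w) (dp, (0 : Int))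
      st.2

-- ===== PORT B =====
-- one backward step: from the vector for row r+1 to the vector for row r
-- (row[c] and nxt[c±1] accesses are always in range here, so pyGetD is exact)
def pvStepB (row : List Char) (w : Int) (nxt : List Int) : List Int :=
  (PySem.List.pyRange 0 w 1).foldl (fun cur c =>
    let ch := if c < (row.length : Int) then PySem.List.pyGetD row c ' ' else ' '
    if ch = '^' then
      cur ++ [(if 0 < c then PySem.List.pyGetD nxt (c - 1) 0 else 0) +
              (if c + 1 < w then PySem.List.pyGetD nxt (c + 1) 0 else 0)]
    else cur ++ [PySem.List.pyGetD nxt c 0]) []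

-- B's 'find S' loop over enumerate(lines) ('if st.isSome' models Python's break)
def pvFindB (lines : List String) : Option (Int × Int) :=
  (PySem.List.enumerate lines).foldl (fun st p =>
    if st.isSome then st
    else
      let c := PySem.Str.find p.2 "S"
      if c ≠ -1 then some (p.1, c) else none) none

def solve_quantum_alt (text : String) : Int :=
  let lines := PySem.Str.splitlines text
  if lines = [] then 0
  else
    let h : Int := lines.length
    let w : Int := (PySem.List.max? (lines.map (fun line => PySem.Str.len line)) (fun x => x)).getD 0
    let start := pvFindB lines
    match start with
    | none => 0
    | some (sr, sc) =>
      let nxt := List.replicate w.toNat (1 : Int)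
      let nxt := (PySem.List.pyRange (h - 2) (sr - 1) (-1)).foldl (fun nxt r =>
          pvStepB (PySem.List.pyGetD lines (r + 1) "").toList w nxt) nxt
      PySem.List.pyGetD nxt sc 0

-- ===== PRECONDITION & SPEC =====
def Spec_solve_quantum (text : String) (out : Int) : Prop := out = solve_quantum_alt text
instance (text : String) (out : Int) : Decidable (Spec_solve_quantum text out) := by unfold Spec_solve_quantum; infer_instance

-- ===== CLAIM (what is proved, stated in full; the proofs are below) =====
def Claim_equal_solve_quantum : Prop := ∀ (text : String), Dom_solve_quantum text → Spec_solve_quantum text (solve_quantum text)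

-- ===== LEMMAS AND PROOFS =====

-- ---- proof-layer definitions ----

-- the character of the (conceptually space-padded) grid at row r, column c
def pvChL (lines : List String) (r c : Nat) : Char := ((lines.getD r "").toList).getD c ' '

-- number of timelines reaching the bottom from cell (lines.length - 1 - k, c)
def pvF (lines : List String) (W : Nat) : Nat → Nat → Int
  | 0, _ => 1
  | k + 1, c =>
    if pvChL lines (lines.length - 1 - k) c = '^' then
      (if 0 < c then pvF lines W k (c - 1) else 0) +
      (if c + 1 < W then pvF lines W k (c + 1) else 0)
    else pvF lines W k c

def pvPadRow (W : Nat) (l : List Char) : List Char := l ++ List.replicate (W - l.length) ' '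

def pvWI (lines : List String) : Int :=
  (PySem.List.max? (lines.map (fun l => (l.toList.length : Int))) (fun x => x)).getD 0

def pvWN (lines : List String) : Nat := (pvWI lines).toNat

-- canonical 'first S in row-major order'
def pvStart (lines : List String) : Option (Int × Int) :=
  (List.range lines.length).findSome? (fun rN =>
    (((lines.getD rN "").toList.findIdx? (fun x => decide (x = 'S'))).map
      (fun k => ((rN : Int), (k : Int)))))

-- the common closed form of both programs
def pvRes (lines : List String) : Int :=
  match pvStart lines with
  | none => 0
  | some p => pvF lines (pvWN lines) (lines.length - 1 - p.1.toNat) p.2.toNat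

-- Nat-level dp-table operations
def pvG (dp : List (List Int)) (r c : Nat) : Int := (dp.getD r []).getD c 0

def pvA2 (dp : List (List Int)) (r c : Nat) (v : Int) : List (List Int) :=
  dp.set r ((dp.getD r []).set c (pvG dp r c + v))

def pvShape (dp : List (List Int)) (h w : Nat) : Prop :=
  dp.length = h ∧ ∀ row ∈ dp, row.length = w

-- Nat-level version of pvCellA (on the unpadded lines)
def pvCellN (lines : List String) (hN WN r : Nat) (s : List (List Int) × Int) (c : Nat) :
    List (List Int) × Int :=
  let ways := pvG s.1 r c
  if ways = 0 then s
  else if hN ≤ r + 1 then (s.1, s.2 + ways)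
  else
    if pvChL lines (r + 1) c = '^' then
      let dp1 := if 0 < c then pvA2 s.1 (r + 1) (c - 1) ways else s.1
      let dp2 := if c + 1 < WN then pvA2 dp1 (r + 1) (c + 1) ways else dp1
      (dp2, s.2)
    else (pvA2 s.1 (r + 1) c ways, s.2)

-- mass flowing from cell (r, c'') into cell (r+1, c)
def pvFlow (lines : List String) (WN : Nat) (dp0 : List (List Int)) (r c'' c : Nat) : Int :=
  if pvChL lines (r + 1) c'' = '^' then
    (if 0 < c'' ∧ c = c'' - 1 then pvG dp0 r c'' else 0) +
    (if c'' + 1 < WN ∧ c = c'' + 1 then pvG dp0 r c'' else 0)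
  else (if c = c'' then pvG dp0 r c'' else 0)

-- ---- generic list lemmas ----

lemma pv_foldl_keep {α β : Type} (L : List α) (f : α → Option β) (p : β) :
    L.foldl (fun st x => if st.isSome then st else f x) (some p) = some p := by
  induction L with
  | nil => rfl
  | cons a t ih => simpa using ih

lemma pv_foldl_first {α β : Type} (L : List α) (f : α → Option β) :
    L.foldl (fun st x => if st.isSome then st else f x) none = L.findSome? f := by
  induction L with
  | nil => rfl
  | cons a t ih =>
    simp only [List.foldl_cons, List.findSome?_cons, Option.isSome_none, Bool.false_eq_true,
      if_false]
    cases h : f a with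
    | none => exact ih
    | some b => exact pv_foldl_keep t f b

lemma pv_findSome?_congr {α β : Type} {L : List α} {f g : α → Option β}
    (h : ∀ x ∈ L, f x = g x) : L.findSome? f = L.findSome? g := by
  induction L with
  | nil => rfl
  | cons a t ih =>
    rw [List.findSome?_cons, List.findSome?_cons, h a (by simp),
      ih (fun x hx => h x (List.mem_cons_of_mem _ hx))]

lemma pv_getD_set {α : Type} (l : List α) (i j : Nat) (x d : α) (hi : i < l.length) :
    (l.set i x).getD j d = if j = i then x else l.getD j d := by
  rw [List.getD_eq_getElem?_getD, List.getD_eq_getElem?_getD, List.getElem?_set]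
  by_cases h : j = i
  · subst h; simp [hi]
  · have h2 : ¬ (i = j) := fun hh => h hh.symm
    simp [h, h2]

lemma pv_getD_replicate {α : Type} (n i : Nat) (a d : α) :
    (List.replicate n a).getD i d = if i < n then a else d := by
  rw [List.getD_eq_getElem?_getD, List.getElem?_replicate]
  split_ifs <;> simp

lemma pv_pad_getD (l : List Char) (m c : Nat) :
    (l ++ List.replicate m ' ').getD c ' ' = l.getD c ' ' := by
  rw [List.getD_eq_getElem?_getD, List.getD_eq_getElem?_getD, List.getElem?_append]
  split_ifs with h
  · rfl
  · rw [List.getElem?_replicate]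
    have hnone : l[c]? = none := List.getElem?_eq_none (by omega)
    split_ifs <;> simp [hnone]

lemma pv_set_append {α : Type} (A B : List α) (x : α) :
    (A ++ B).set A.length x = A ++ B.set 0 x := by
  induction A with
  | nil => rfl
  | cons a t ih => simpa using ih

lemma pv_set_append_len {α : Type} (A B : List α) (x : α) (n : Nat) (hn : A.length = n) :
    (A ++ B).set n x = A ++ B.set 0 x := by
  subst hn
  exact pv_set_append A B x

lemma pv_foldl_range_upd {α : Type} (cnd : α → Prop) [DecidablePred cnd] (f : α → α) (d : α) :
    ∀ (n : Nat) (g : List α), n ≤ g.length →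
      (List.range n).foldl
        (fun g r => if cnd (g.getD r d) then g.set r (f (g.getD r d)) else g) g
      = (g.take n).map (fun row => if cnd row then f row else row) ++ g.drop n := by
  intro n
  induction n with
  | zero => intro g _; simp
  | succ n ih =>
    intro g hn
    have hnlt : n < g.length := by omega
    rw [List.range_succ, List.foldl_append, ih g (by omega), List.foldl_cons, List.foldl_nil]
    set u : α → α := fun row => if cnd row then f row else row with hu
    have hlen : ((g.take n).map u).length = n := by
      rw [List.length_map, List.length_take]
      omega
    have hdrop : g.drop n = g[n] :: g.drop (n + 1) := List.drop_eq_getElem_cons hnlt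
    have hGn : ((g.take n).map u ++ g.drop n).getD n d = g[n] := by
      rw [List.getD_eq_getElem?_getD, List.getElem?_append, hlen]
      rw [if_neg (by omega : ¬ n < n), Nat.sub_self, hdrop]
      rfl
    have htake : g.take (n + 1) = g.take n ++ [g[n]] := by
      rw [List.take_succ]
      simp [List.getElem?_eq_getElem hnlt]
    rw [hGn]
    by_cases hc : cnd g[n]
    · rw [if_pos hc]
      rw [pv_set_append_len ((g.take n).map u) (g.drop n) (f g[n]) n hlen, hdrop, List.set_cons_zero, htake, List.map_append]
      have huval : u g[n] = f g[n] := by rw [hu]; simp [hc]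
      simp [huval]
    · rw [if_neg hc]
      have huval : u g[n] = g[n] := by rw [hu]; simp [hc]
      rw [htake, List.map_append, hdrop]
      simp [huval]

-- ---- width lemmas ----

lemma pvWI_spec (lines : List String) (hne : lines ≠ []) :
    0 ≤ pvWI lines ∧ ∀ l ∈ lines, (l.toList.length : Int) ≤ pvWI lines := by
  unfold pvWI
  cases hm : PySem.List.max? (lines.map (fun l => (l.toList.length : Int))) (fun x => x) with
  | none =>
    exact absurd (List.map_eq_nil_iff.mp ((PySem.List.max?_eq_none_iff _ _).mp hm)) hne
  | some m =>
    have hmem := PySem.List.max?_mem hm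
    obtain ⟨l0, _, hl0⟩ := List.mem_map.mp hmem
    have hmax := PySem.List.max?_isMax hm
    refine ⟨by simp [← hl0], ?_⟩
    intro l hl
    simpa using hmax _ (List.mem_map_of_mem hl)

lemma pvWN_cast (lines : List String) (hne : lines ≠ []) :
    ((pvWN lines : Nat) : Int) = pvWI lines :=
  Int.toNat_of_nonneg (pvWI_spec lines hne).1

lemma pvWN_ge (lines : List String) (hne : lines ≠ []) {l : String} (hl : l ∈ lines) :
    l.toList.length ≤ pvWN lines := by
  have := (pvWI_spec lines hne).2 l hl
  unfold pvWN
  omega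

-- ---- padded-grid lemmas ----

lemma pv_grid_ch (lines : List String) (WN : Nat) (r c : Nat) :
    ((lines.map (fun line => pvPadRow WN line.toList)).getD r []).getD c ' ' = pvChL lines r c := by
  unfold pvChL
  by_cases hr : r < lines.length
  · have h1 : (lines.map (fun line => pvPadRow WN line.toList)).getD r [] =
        pvPadRow WN (lines[r]).toList := by
      rw [List.getD_eq_getElem?_getD, List.getElem?_map, List.getElem?_eq_getElem hr]
      rfl
    have h2 : lines.getD r "" = lines[r] := by
      rw [List.getD_eq_getElem?_getD, List.getElem?_eq_getElem hr]
      rfl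
    rw [h1, h2]
    exact pv_pad_getD _ _ _
  · have h1 : (lines.map (fun line => pvPadRow WN line.toList)).getD r [] = [] :=
      List.getD_eq_default _ _ (by simpa using Nat.le_of_not_lt hr)
    have h2 : lines.getD r "" = "" := List.getD_eq_default _ _ (Nat.le_of_not_lt hr)
    rw [h1, h2]
    rfl

lemma pvPadLoopA_eq (lines : List String) (w : Int) (WN : Nat) (hw : w = (WN : Int))
    (hle : ∀ l ∈ lines, l.toList.length ≤ WN) :
    pvPadLoopA (lines.map (fun l => l.toList)) ((lines.length : Nat) : Int) w
      = lines.map (fun line => pvPadRow WN line.toList) := by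
  unfold pvPadLoopA
  rw [PySem.List.pyRange_zero_natCast, List.foldl_map]
  have hbody : ∀ (g : List (List Char)), ∀ r ∈ List.range lines.length,
      (fun (g : List (List Char)) (r : Int) =>
        let row := PySem.List.pyGetD g r []
        if (row.length : Int) < w then
          PySem.List.pySetD g r (row ++ List.replicate (w - (row.length : Int)).toNat ' ')
        else g) g ((fun (k : Nat) => (k : Int)) r)
      = (fun (g : List (List Char)) (r : Nat) =>
          if ((g.getD r []).length : Int) < w then
            g.set r (g.getD r [] ++ List.replicate (w - ((g.getD r []).length : Int)).toNat ' ')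
          else g) g r := by
    intro g r _
    simp [PySem.List.pyGetD_natCast, PySem.List.pySetD_natCast]
  rw [PySem.List.foldl_congr_mem _ _ _ _ hbody]
  rw [show (List.range lines.length) = (List.range (lines.map (fun l => l.toList)).length) by simp]
  rw [pv_foldl_range_upd (fun row => ((row.length : Int) < w))
      (fun row => row ++ List.replicate (w - (row.length : Int)).toNat ' ') []
      (lines.map (fun l => l.toList)).length (lines.map (fun l => l.toList)) (le_refl _)]
  rw [List.take_length, List.drop_length, List.append_nil, List.map_map]
  apply List.map_congr_left
  intro l hl
  have hlen2 := hle l hl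
  simp only [Function.comp]
  by_cases hc : ((l.toList.length : Int) < w)
  · rw [if_pos hc]
    unfold pvPadRow
    congr 2
    rw [hw]
    omega
  · rw [if_neg hc]
    unfold pvPadRow
    have hz : WN - l.toList.length = 0 := by
      rw [hw] at hc
      omega
    rw [hz, List.replicate_zero, List.append_nil]

-- ---- find-S lemmas ----

lemma pv_prefix_singleton (a : Char) (t : List Char) : [a] <+: t ↔ t.head? = some a := by
  cases t with
  | nil => simp
  | cons b u => simp [List.cons_prefix_cons, eq_comm]

lemma pv_find_char (l : List Char) (a : Char) :
    PySem.Chars.find l [a] =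
      (match l.findIdx? (fun x => decide (x = a)) with
        | some k => (k : Int)
        | none => -1) := by
  cases hfi : l.findIdx? (fun x => decide (x = a)) with
  | none =>
    have hall := List.findIdx?_eq_none_iff.mp hfi
    have hninf : ¬ [a] <:+: l := by
      intro hinf
      have ha : a ∈ l := hinf.subset (by simp)
      have := hall a ha
      simp at this
    exact (PySem.Chars.find_eq_neg_one_iff l [a]).mpr hninf
  | some k =>
    obtain ⟨hk, hpk, hmin⟩ := List.findIdx?_eq_some_iff_getElem.mp hfi
    have hka : l[k] = a := by simpa using hpk
    have hinf : [a] <:+: l := by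
      refine ⟨l.take k, l.drop (k + 1), ?_⟩
      rw [show l.take k ++ [a] ++ l.drop (k + 1) = l.take k ++ (a :: l.drop (k + 1)) by simp]
      rw [← hka, ← List.drop_eq_getElem_cons hk, List.take_append_drop]
    have hnneg : 0 ≤ PySem.Chars.find l [a] := (PySem.Chars.find_nonneg_iff l [a]).mpr hinf
    obtain ⟨hpre, hmin'⟩ := PySem.Chars.find_spec hnneg
    set n := (PySem.Chars.find l [a]).toNat with hn
    have hln : l[n]? = some a := by
      rw [← List.head?_drop]
      exact (pv_prefix_singleton a _).mp hpre
    have hnlt : n < l.length := by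
      by_contra hcon
      rw [List.getElem?_eq_none (by omega)] at hln
      simp at hln
    have hna : l[n] = a := by
      rw [List.getElem?_eq_getElem hnlt] at hln
      exact Option.some.inj hln
    have h1 : ¬ n < k := by
      intro hlt
      have := hmin n hlt
      simp [hna] at this
    have h2 : ¬ k < n := by
      intro hlt
      apply hmin' k hlt
      rw [pv_prefix_singleton, List.head?_drop, List.getElem?_eq_getElem hk, hka]
    have hnk : n = k := by omega
    rw [← hnk, hn]
    exact (Int.toNat_of_nonneg hnneg).symm

lemma pv_findIdx?_pad (l : List Char) (m : Nat) :
    (l ++ List.replicate m ' ').findIdx? (fun x => decide (x = 'S'))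
      = l.findIdx? (fun x => decide (x = 'S')) := by
  rw [List.findIdx?_append]
  have h0 : (List.replicate m ' ').findIdx? (fun x => decide (x = 'S')) = none := by
    rw [List.findIdx?_eq_none_iff]
    intro x hx
    simp [List.eq_of_mem_replicate hx]
  rw [h0]
  simp

lemma pv_findSome?_range_idx {α β : Type} (q : α → Prop) [DecidablePred q] (d : α) :
    ∀ (P : List α) (emb : Nat → β),
      (List.range P.length).findSome? (fun k => if q (P.getD k d) then some (emb k) else none)
        = (P.findIdx? (fun x => decide (q x))).map emb := by
  intro P
  induction P with
  | nil => intro emb; rfl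
  | cons a t ih =>
    intro emb
    rw [List.length_cons, List.range_succ_eq_map, List.findSome?_cons]
    simp only [List.getD_cons_zero]
    by_cases hq : q a
    · rw [if_pos hq, List.findIdx?_cons, if_pos (by simpa using hq)]
      rfl
    · rw [if_neg hq, List.findSome?_map]
      have hfn : ((fun k => if q ((a :: t).getD k d) then some (emb k) else none) ∘ Nat.succ)
          = (fun k => if q (t.getD k d) then some ((emb ∘ Nat.succ) k) else none) := by
        funext k
        simp [Function.comp]
      rw [hfn, ih (emb ∘ Nat.succ), List.findIdx?_cons, if_neg (by simpa using hq),
        Option.map_map]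

lemma pvScanRowA_eq (lines : List String) (WN : Nat) (rN : Nat)
    (hr : rN < lines.length) (hle : (lines.getD rN "").toList.length ≤ WN) :
    pvScanRowA (lines.map (fun line => pvPadRow WN line.toList)) (WN : Int) (rN : Int)
      = ((lines.getD rN "").toList.findIdx? (fun x => decide (x = 'S'))).map
          (fun k => ((rN : Int), (k : Int))) := by
  unfold pvScanRowA
  rw [pv_foldl_first]
  rw [PySem.List.pyRange_zero_natCast, List.findSome?_map]
  set P := pvPadRow WN (lines.getD rN "").toList with hP
  have hPlen : P.length = WN := by
    rw [hP]
    unfold pvPadRow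
    rw [List.length_append, List.length_replicate]
    omega
  have hgrid : ∀ (c : Nat),
      PySem.List.pyGetD (PySem.List.pyGetD (lines.map (fun line => pvPadRow WN line.toList)) (rN : Int) []) ((c : Nat) : Int) ' '
        = P.getD c ' ' := by
    intro c
    rw [PySem.List.pyGetD_natCast, PySem.List.pyGetD_natCast]
    congr 1
    rw [List.getD_eq_getElem?_getD, List.getElem?_map, List.getElem?_eq_getElem hr]
    simp only [Option.map_some, Option.getD_some]
    rw [hP]
    congr 1
    rw [List.getD_eq_getElem?_getD, List.getElem?_eq_getElem hr]
    rfl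
  have hcongr : ∀ x ∈ List.range WN,
      ((fun (st2 : Option (Int × Int)) (c : Int) =>
        if PySem.List.pyGetD (PySem.List.pyGetD (lines.map (fun line => pvPadRow WN line.toList)) (rN : Int) []) c ' ' = 'S'
        then some ((rN : Int), c) else none) none ∘ fun (k : Nat) => (k : Int)) x
      = (fun (k : Nat) => if ((P.getD k ' ') = 'S') then some ((rN : Int), (k : Int)) else none) x := by
    intro x _
    simp only [Function.comp]
    rw [hgrid x]
  rw [pv_findSome?_congr hcongr]
  rw [← hPlen]
  rw [pv_findSome?_range_idx (fun x => x = 'S') ' ' P (fun k => ((rN : Int), (k : Int)))]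
  rw [hP]
  unfold pvPadRow
  rw [pv_findIdx?_pad]
  cases (lines.getD rN "").toList.findIdx? (fun x => decide (x = 'S')) <;> rfl

lemma pvFindA_eq (lines : List String) (WN : Nat)
    (hle : ∀ l ∈ lines, l.toList.length ≤ WN) :
    pvFindA (lines.map (fun line => pvPadRow WN line.toList)) ((lines.length : Nat) : Int) (WN : Int)
      = pvStart lines := by
  unfold pvFindA pvStart
  rw [pv_foldl_first, PySem.List.pyRange_zero_natCast, List.findSome?_map]
  apply pv_findSome?_congr
  intro rN hrN
  have hr : rN < lines.length := List.mem_range.mp hrN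
  have hmem : lines.getD rN "" ∈ lines := by
    rw [List.getD_eq_getElem?_getD, List.getElem?_eq_getElem hr]
    exact List.getElem_mem hr
  exact pvScanRowA_eq lines WN rN hr (hle _ hmem)

lemma pvFindB_eq (lines : List String) : pvFindB lines = pvStart lines := by
  unfold pvFindB pvStart
  rw [pv_foldl_first, PySem.List.enumerate_eq_map_pyRange lines "", List.findSome?_map]
  rw [PySem.List.len_eq, PySem.List.pyRange_zero_natCast, List.findSome?_map]
  apply pv_findSome?_congr
  intro rN _
  simp only [Function.comp, PySem.List.pyGetD_natCast]
  rw [PySem.Str.find_eq]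
  rw [show ("S" : String).toList = ['S'] from rfl, pv_find_char]
  cases hfi : (lines.getD rN "").toList.findIdx? (fun x => decide (x = 'S')) with
  | none => simp [hfi]
  | some k =>
    have hne : ((k : Int)) ≠ -1 := by omega
    simp [hfi, hne]

lemma pvStart_some (lines : List String) (sr sc : Int)
    (h : pvStart lines = some (sr, sc)) :
    ∃ (rN kN : Nat), sr = (rN : Int) ∧ sc = (kN : Int) ∧ rN < lines.length ∧
      kN < (lines.getD rN "").toList.length := by
  obtain ⟨rN, hmem, hf⟩ := List.exists_of_findSome?_eq_some h
  have hr : rN < lines.length := List.mem_range.mp hmem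
  cases hfi : (lines.getD rN "").toList.findIdx? (fun x => decide (x = 'S')) with
  | none =>
    rw [hfi] at hf
    cases hf
  | some k =>
    rw [hfi] at hf
    have hf2 : some (((rN : Int), (k : Int))) = some (sr, sc) := hf
    have hf' := Option.some.inj hf2
    obtain ⟨hk, _, _⟩ := List.findIdx?_eq_some_iff_getElem.mp hfi
    exact ⟨rN, k, (congrArg Prod.fst hf').symm, (congrArg Prod.snd hf').symm, hr, hk⟩

-- ---- dp-table lemmas ----

lemma pv_shape_getD (dp : List (List Int)) (h w r : Nat) (hs : pvShape dp h w) (hr : r < h) :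
    (dp.getD r []).length = w := by
  obtain ⟨h1, h2⟩ := hs
  have hrl : r < dp.length := by omega
  rw [List.getD_eq_getElem?_getD, List.getElem?_eq_getElem hrl]
  exact h2 _ (List.getElem_mem hrl)

lemma pvG_a2 (dp : List (List Int)) (r c : Nat) (v : Int) (r' c' : Nat)
    (hr : r < dp.length) (hc : c < (dp.getD r []).length) :
    pvG (pvA2 dp r c v) r' c'
      = if r' = r ∧ c' = c then pvG dp r c + v else pvG dp r' c' := by
  unfold pvG pvA2
  rw [pv_getD_set _ _ _ _ _ hr]
  by_cases h1 : r' = r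
  · subst h1
    rw [if_pos rfl, pv_getD_set _ _ _ _ _ hc]
    by_cases h2 : c' = c
    · simp [h2, pvG]
    · simp [h2, pvG]
  · rw [if_neg h1]
    simp [h1]

lemma pv_shape_a2 (dp : List (List Int)) (h w r c : Nat) (v : Int)
    (hs : pvShape dp h w) (hr : r < h) :
    pvShape (pvA2 dp r c v) h w := by
  obtain ⟨h1, h2⟩ := hs
  constructor
  · simp [pvA2, h1]
  · intro row hrow
    unfold pvA2 at hrow
    rcases List.mem_or_eq_of_mem_set hrow with hmem | heq
    · exact h2 _ hmem
    · rw [heq, List.length_set]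
      exact pv_shape_getD dp h w r ⟨h1, h2⟩ hr

lemma pvG_dp1 (hN WN srN scN : Nat) (hsr : srN < hN) (hsc : scN < WN) (r' c' : Nat) :
    pvG ((List.replicate hN (List.replicate WN (0 : Int))).set srN
          ((List.replicate WN (0 : Int)).set scN 1)) r' c'
      = if r' = srN ∧ c' = scN then 1 else 0 := by
  unfold pvG
  rw [pv_getD_set _ _ _ _ _ (by simpa using hsr)]
  by_cases h1 : r' = srN
  · subst h1
    rw [if_pos rfl, pv_getD_set _ _ _ _ _ (by simpa using hsc)]
    by_cases h2 : c' = scN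
    · simp [h2]
    · simp [h2, pv_getD_replicate]
  · rw [if_neg h1]
    simp only [h1, false_and, if_false]
    rw [pv_getD_replicate]
    split_ifs with h
    · rw [pv_getD_replicate]
      split_ifs <;> rfl
    · rfl

-- ---- A-side row lemmas ----

lemma pvRow_last (lines : List String) (hN WN r : Nat) (s0 : List (List Int) × Int)
    (hr : hN ≤ r + 1) :
    ∀ j, (List.range j).foldl (pvCellN lines hN WN r) s0
      = (s0.1, s0.2 + ∑ c ∈ Finset.range j, pvG s0.1 r c) := by
  intro j
  induction j with
  | zero => simp
  | succ j ih =>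
    rw [List.range_succ, List.foldl_append, ih, List.foldl_cons, List.foldl_nil]
    unfold pvCellN
    simp only [Finset.sum_range_succ]
    by_cases h0 : pvG s0.1 r j = 0
    · simp [h0]
    · simp [h0, hr, add_assoc]

lemma pvRow_mid (lines : List String) (hN WN r : Nat) (s0 : List (List Int) × Int)
    (hr : r + 1 < hN) (hsh : pvShape s0.1 hN WN) :
    ∀ j, j ≤ WN →
      ((List.range j).foldl (pvCellN lines hN WN r) s0).2 = s0.2 ∧
      pvShape ((List.range j).foldl (pvCellN lines hN WN r) s0).1 hN WN ∧
      (∀ r' c', r' ≠ r + 1 →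
        pvG ((List.range j).foldl (pvCellN lines hN WN r) s0).1 r' c' = pvG s0.1 r' c') ∧
      (∀ c', pvG ((List.range j).foldl (pvCellN lines hN WN r) s0).1 (r + 1) c'
        = pvG s0.1 (r + 1) c' + ∑ c'' ∈ Finset.range j, pvFlow lines WN s0.1 r c'' c') := by
  intro j
  induction j with
  | zero => exact fun _ => ⟨rfl, hsh, fun _ _ _ => rfl, fun c' => by simp⟩
  | succ j ih =>
    intro hj
    obtain ⟨ih1, ih2, ih3, ih4⟩ := ih (by omega)
    set s := (List.range j).foldl (pvCellN lines hN WN r) s0 with hs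
    rw [List.range_succ, List.foldl_append, List.foldl_cons, List.foldl_nil, ← hs]
    have hgj : pvG s.1 r j = pvG s0.1 r j := ih3 r j (by omega)
    have hnle : ¬ hN ≤ r + 1 := by omega
    have hslen : s.1.length = hN := ih2.1
    have hrowlen : (s.1.getD (r + 1) []).length = WN := pv_shape_getD _ _ _ _ ih2 hr
    have step : ∀ (dp : List (List Int)) (x : Nat) (v : Int), pvShape dp hN WN → x < WN →
        pvShape (pvA2 dp (r + 1) x v) hN WN ∧
        (∀ r' c', r' ≠ r + 1 → pvG (pvA2 dp (r + 1) x v) r' c' = pvG dp r' c') ∧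
        (∀ c', pvG (pvA2 dp (r + 1) x v) (r + 1) c'
          = pvG dp (r + 1) c' + if c' = x then v else 0) := by
      intro dp x v hsdp hx
      have hdl := hsdp.1
      have hrl : r + 1 < dp.length := by omega
      have hrow : (dp.getD (r + 1) []).length = WN := pv_shape_getD _ _ _ _ hsdp hr
      refine ⟨pv_shape_a2 _ _ _ _ _ _ hsdp hr, ?_, ?_⟩
      · intro r' c' hne'
        rw [pvG_a2 _ _ _ _ _ _ hrl (by omega)]
        simp [hne']
      · intro c'
        rw [pvG_a2 _ _ _ _ _ _ hrl (by omega)]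
        by_cases h2 : c' = x
        · simp [h2]
        · simp [h2]
    unfold pvCellN
    by_cases h0 : pvG s.1 r j = 0
    · rw [if_pos h0]
      have hflow0 : ∀ c', pvFlow lines WN s0.1 r j c' = 0 := by
        intro c'
        have hz : pvG s0.1 r j = 0 := by rw [← hgj]; exact h0
        unfold pvFlow
        split_ifs <;> simp [hz]
      refine ⟨ih1, ih2, ih3, ?_⟩
      intro c'
      rw [Finset.sum_range_succ, hflow0 c', add_zero]
      exact ih4 c'
    · rw [if_neg h0, if_neg hnle]
      by_cases hch : pvChL lines (r + 1) j = '^'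
      · rw [if_pos hch]
        set D1 := (if 0 < j then pvA2 s.1 (r + 1) (j - 1) (pvG s.1 r j) else s.1) with hD1
        have hdp1p : pvShape D1 hN WN ∧
            (∀ r' c', r' ≠ r + 1 → pvG D1 r' c' = pvG s.1 r' c') ∧
            (∀ c', pvG D1 (r + 1) c'
              = pvG s.1 (r + 1) c' + if 0 < j ∧ c' = j - 1 then pvG s.1 r j else 0) := by
          rw [hD1]
          by_cases hj0 : 0 < j
          · rw [if_pos hj0]
            obtain ⟨a, b, cc⟩ := step s.1 (j - 1) (pvG s.1 r j) ih2 (by omega)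
            refine ⟨a, b, fun c' => ?_⟩
            rw [cc c']
            by_cases h : c' = j - 1 <;> simp [h, hj0]
          · rw [if_neg hj0]
            exact ⟨ih2, fun _ _ _ => rfl, fun c' => by simp [hj0]⟩
        set D2 := (if j + 1 < WN then pvA2 D1 (r + 1) (j + 1) (pvG s.1 r j) else D1) with hD2
        have hdp2p : pvShape D2 hN WN ∧
            (∀ r' c', r' ≠ r + 1 → pvG D2 r' c' = pvG D1 r' c') ∧
            (∀ c', pvG D2 (r + 1) c'
              = pvG D1 (r + 1) c' + if j + 1 < WN ∧ c' = j + 1 then pvG s.1 r j else 0) := by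
          rw [hD2]
          by_cases hj1 : j + 1 < WN
          · rw [if_pos hj1]
            obtain ⟨a, b, cc⟩ := step D1 (j + 1) (pvG s.1 r j) hdp1p.1 hj1
            refine ⟨a, b, fun c' => ?_⟩
            rw [cc c']
            by_cases h : c' = j + 1 <;> simp [h, hj1]
          · rw [if_neg hj1]
            exact ⟨hdp1p.1, fun _ _ _ => rfl, fun c' => by simp [hj1]⟩
        refine ⟨ih1, hdp2p.1, ?_, ?_⟩
        · intro r' c' hne'
          rw [hdp2p.2.1 r' c' hne', hdp1p.2.1 r' c' hne']
          exact ih3 r' c' hne'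
        · intro c'
          rw [hdp2p.2.2 c', hdp1p.2.2 c', ih4 c', Finset.sum_range_succ]
          have hflowj : pvFlow lines WN s0.1 r j c'
              = (if 0 < j ∧ c' = j - 1 then pvG s.1 r j else 0)
                + (if j + 1 < WN ∧ c' = j + 1 then pvG s.1 r j else 0) := by
            unfold pvFlow
            rw [if_pos hch, hgj]
          rw [hflowj]
          ring
      · rw [if_neg hch]
        obtain ⟨a, b, cc⟩ := step s.1 j (pvG s.1 r j) ih2 (by omega)
        refine ⟨ih1, a, ?_, ?_⟩
        · intro r' c' hne'
          rw [b r' c' hne']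
          exact ih3 r' c' hne'
        · intro c'
          rw [cc c', ih4 c', Finset.sum_range_succ]
          have hflowj : pvFlow lines WN s0.1 r j c' = if c' = j then pvG s.1 r j else 0 := by
            unfold pvFlow
            rw [if_neg hch, hgj]
          rw [hflowj]
          ring

-- ---- sum-transfer lemma ----

lemma pv_flow_sum (lines : List String) (WN : Nat) (dp0 : List (List Int)) (r : Nat)
    (hr : r + 1 < lines.length) :
    ∑ c ∈ Finset.range WN,
        (∑ c'' ∈ Finset.range WN, pvFlow lines WN dp0 r c'' c) *
          pvF lines WN (lines.length - 1 - (r + 1)) c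
      = ∑ c'' ∈ Finset.range WN, pvG dp0 r c'' * pvF lines WN (lines.length - 1 - r) c'' := by
  have hkk : lines.length - 1 - r = (lines.length - 1 - (r + 1)) + 1 := by omega
  have hrk : lines.length - 1 - (lines.length - 1 - (r + 1)) = r + 1 := by omega
  rw [hkk]
  simp only [Finset.sum_mul]
  rw [Finset.sum_comm]
  apply Finset.sum_congr rfl
  intro c'' hc''
  have hcw : c'' < WN := Finset.mem_range.mp hc''
  rw [show pvF lines WN ((lines.length - 1 - (r + 1)) + 1) c''
      = (if pvChL lines (r + 1) c'' = '^' then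
          (if 0 < c'' then pvF lines WN (lines.length - 1 - (r + 1)) (c'' - 1) else 0) +
          (if c'' + 1 < WN then pvF lines WN (lines.length - 1 - (r + 1)) (c'' + 1) else 0)
        else pvF lines WN (lines.length - 1 - (r + 1)) c'') from by rw [pvF, hrk]]
  by_cases hch : pvChL lines (r + 1) c'' = '^'
  · have hcongr : ∑ x ∈ Finset.range WN,
        pvFlow lines WN dp0 r c'' x * pvF lines WN (lines.length - 1 - (r + 1)) x
        = ∑ x ∈ Finset.range WN,
            ((if 0 < c'' ∧ x = c'' - 1 then
                pvG dp0 r c'' * pvF lines WN (lines.length - 1 - (r + 1)) x else 0)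
             + (if c'' + 1 < WN ∧ x = c'' + 1 then
                pvG dp0 r c'' * pvF lines WN (lines.length - 1 - (r + 1)) x else 0)) := by
      apply Finset.sum_congr rfl
      intro x hx
      unfold pvFlow
      rw [if_pos hch, add_mul, ite_mul, ite_mul]
      simp
    rw [hcongr, Finset.sum_add_distrib]
    have e1 : ∑ c ∈ Finset.range WN,
        (if 0 < c'' ∧ c = c'' - 1 then pvG dp0 r c'' * pvF lines WN (lines.length - 1 - (r + 1)) c else 0)
        = if 0 < c'' then pvG dp0 r c'' * pvF lines WN (lines.length - 1 - (r + 1)) (c'' - 1) else 0 := by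
      by_cases h0 : 0 < c''
      · simp only [h0, true_and]
        rw [Finset.sum_ite_eq' (Finset.range WN) (c'' - 1)
            (fun c => pvG dp0 r c'' * pvF lines WN (lines.length - 1 - (r + 1)) c)]
        rw [if_pos (Finset.mem_range.mpr (show c'' - 1 < WN by omega))]
        simp
      · simp [h0]
    have e2 : ∑ c ∈ Finset.range WN,
        (if c'' + 1 < WN ∧ c = c'' + 1 then pvG dp0 r c'' * pvF lines WN (lines.length - 1 - (r + 1)) c else 0)
        = if c'' + 1 < WN then pvG dp0 r c'' * pvF lines WN (lines.length - 1 - (r + 1)) (c'' + 1) else 0 := by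
      by_cases h1 : c'' + 1 < WN
      · simp only [h1, true_and]
        rw [Finset.sum_ite_eq' (Finset.range WN) (c'' + 1)
            (fun c => pvG dp0 r c'' * pvF lines WN (lines.length - 1 - (r + 1)) c)]
        rw [if_pos (Finset.mem_range.mpr (show c'' + 1 < WN from h1))]
        simp
      · simp [h1]
    rw [e1, e2, if_pos hch]
    simp only [mul_add, mul_ite, mul_zero]
  · have hcongr : ∑ x ∈ Finset.range WN,
        pvFlow lines WN dp0 r c'' x * pvF lines WN (lines.length - 1 - (r + 1)) x
        = ∑ x ∈ Finset.range WN,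
            (if x = c'' then pvG dp0 r c'' * pvF lines WN (lines.length - 1 - (r + 1)) x else 0) := by
      apply Finset.sum_congr rfl
      intro x hx
      unfold pvFlow
      rw [if_neg hch, ite_mul]
      simp
    rw [hcongr, Finset.sum_ite_eq' (Finset.range WN) c''
        (fun c => pvG dp0 r c'' * pvF lines WN (lines.length - 1 - (r + 1)) c)]
    rw [if_pos (Finset.mem_range.mpr hcw), if_neg hch]

-- ---- bridging A's Int-level loops to the Nat level ----

lemma pvAdd2_natCast (dp : List (List Int)) (r c : Nat) (v : Int) :
    pvAdd2 dp (r : Int) (c : Int) v = pvA2 dp r c v := by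
  simp [pvAdd2, pvA2, pvGet2, pvG, PySem.List.pyGetD_natCast, PySem.List.pySetD_natCast]

lemma pvCellA_eq_cellN (lines : List String) (WN hN : Nat)
    (s : List (List Int) × Int) (r c : Nat) :
    pvCellA (lines.map (fun line => pvPadRow WN line.toList)) (hN : Int) (WN : Int) (r : Int) s (c : Int)
      = pvCellN lines hN WN r s c := by
  simp only [pvCellA, pvCellN]
  have hget : pvGet2 s.1 (r : Int) (c : Int) = pvG s.1 r c := by
    simp [pvGet2, pvG, PySem.List.pyGetD_natCast]
  rw [hget]
  by_cases h0 : pvG s.1 r c = 0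
  · rw [if_pos h0, if_pos h0]
  · rw [if_neg h0, if_neg h0]
    by_cases hle : hN ≤ r + 1
    · rw [if_pos (by exact_mod_cast hle : (hN : Int) ≤ (r : Int) + 1), if_pos hle]
    · rw [if_neg (by omega : ¬ ((hN : Int) ≤ (r : Int) + 1)), if_neg hle]
      have hch : PySem.List.pyGetD
          (PySem.List.pyGetD (lines.map (fun line => pvPadRow WN line.toList)) ((r : Int) + 1) [])
          (c : Int) ' ' = pvChL lines (r + 1) c := by
        rw [show ((r : Int) + 1) = ((r + 1 : Nat) : Int) by push_cast; ring]
        rw [PySem.List.pyGetD_natCast, PySem.List.pyGetD_natCast]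
        exact pv_grid_ch lines WN (r + 1) c
      rw [hch]
      by_cases hc : pvChL lines (r + 1) c = '^'
      · rw [if_pos hc, if_pos hc]
        have hdp1 : (if (0 : Int) < (c : Int) then
              pvAdd2 s.1 ((r : Int) + 1) ((c : Int) - 1) (pvG s.1 r c) else s.1)
            = (if 0 < c then pvA2 s.1 (r + 1) (c - 1) (pvG s.1 r c) else s.1) := by
          by_cases h0c : 0 < c
          · rw [if_pos (by omega : (0 : Int) < (c : Int)), if_pos h0c]
            rw [show ((r : Int) + 1) = ((r + 1 : Nat) : Int) by push_cast; ring]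
            rw [show ((c : Int) - 1) = ((c - 1 : Nat) : Int) by omega]
            exact pvAdd2_natCast _ _ _ _
          · rw [if_neg (by omega : ¬ ((0 : Int) < (c : Int))), if_neg h0c]
        rw [hdp1]
        by_cases h1c : c + 1 < WN
        · rw [if_pos (by omega : (c : Int) + 1 < (WN : Int)), if_pos h1c]
          rw [show ((r : Int) + 1) = ((r + 1 : Nat) : Int) by push_cast; ring]
          rw [show ((c : Int) + 1) = ((c + 1 : Nat) : Int) by push_cast; ring]
          rw [pvAdd2_natCast]
        · rw [if_neg (by omega : ¬ ((c : Int) + 1 < (WN : Int))), if_neg h1c]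
      · rw [if_neg hc, if_neg hc]
        rw [show ((r : Int) + 1) = ((r + 1 : Nat) : Int) by push_cast; ring]
        rw [pvAdd2_natCast]

lemma pvRowA_eq (lines : List String) (hN WN : Nat) (s : List (List Int) × Int) (r : Nat) :
    pvRowA (lines.map (fun line => pvPadRow WN line.toList)) (hN : Int) (WN : Int) s (r : Int)
      = (List.range WN).foldl (pvCellN lines hN WN r) s := by
  unfold pvRowA
  rw [PySem.List.pyRange_zero_natCast, List.foldl_map]
  exact PySem.List.foldl_congr_mem _ _ _ _
    (fun acc x _ => pvCellA_eq_cellN lines WN hN acc r x)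

-- ---- outer induction on the rows (A side) ----

lemma pvOuter (lines : List String) (WN : Nat) (tgt : Int) :
    ∀ (m r : Nat) (s : List (List Int) × Int), r + m = lines.length →
      pvShape s.1 lines.length WN →
      (∀ r' c', r < r' → pvG s.1 r' c' = 0) →
      (if r < lines.length then
          s.2 + ∑ c ∈ Finset.range WN, pvG s.1 r c * pvF lines WN (lines.length - 1 - r) c = tgt
        else s.2 = tgt) →
      ((PySem.List.pyRange (r : Int) ((lines.length : Nat) : Int) 1).foldl
          (pvRowA (lines.map (fun line => pvPadRow WN line.toList))
            ((lines.length : Nat) : Int) (WN : Int)) s).2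
        = tgt := by
  intro m
  induction m with
  | zero =>
    intro r s hm hsh hz hinv
    rw [PySem.List.pyRange_one_eq_nil (by omega)]
    simpa [show ¬ r < lines.length by omega] using hinv
  | succ m ih =>
    intro r s hm hsh hz hinv
    have hrlt : r < lines.length := by omega
    rw [PySem.List.pyRange_one_cons (by exact_mod_cast hrlt), List.foldl_cons]
    rw [pvRowA_eq lines lines.length WN s r]
    rw [show ((r : Int) + 1) = ((r + 1 : Nat) : Int) by push_cast; ring]
    rw [if_pos hrlt] at hinv
    by_cases hlast : r + 1 = lines.length
    · rw [pvRow_last lines lines.length WN r s (by omega) WN]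
      apply ih (r + 1) (s.1, s.2 + ∑ c ∈ Finset.range WN, pvG s.1 r c) (by omega) hsh
        (fun r' c' h => hz r' c' (by omega))
      rw [if_neg (by omega)]
      have h0 : lines.length - 1 - r = 0 := by omega
      rw [h0] at hinv
      simpa [pvF] using hinv
    · have hmid := pvRow_mid lines lines.length WN r s (by omega) hsh WN (le_refl WN)
      obtain ⟨m1, m2, m3, m4⟩ := hmid
      apply ih (r + 1) _ (by omega) m2
      · intro r' c' hgt
        rw [m3 r' c' (by omega)]
        exact hz r' c' (by omega)
      · rw [if_pos (by omega), m1]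
        have hsum : ∑ c ∈ Finset.range WN,
            pvG ((List.range WN).foldl (pvCellN lines lines.length WN r) s).1 (r + 1) c *
              pvF lines WN (lines.length - 1 - (r + 1)) c
            = ∑ c'' ∈ Finset.range WN, pvG s.1 r c'' * pvF lines WN (lines.length - 1 - r) c'' := by
          rw [Finset.sum_congr rfl (fun c _ => by
            rw [m4 c, hz (r + 1) c (by omega), zero_add])]
          exact pv_flow_sum lines WN s.1 r (by omega)
        rw [hsum]
        exact hinv

-- ---- B-side lemmas ----

lemma pvStepB_eq (row : List Char) (WN : Nat) (nxt : List Int) :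
    pvStepB row (WN : Int) nxt
      = (List.range WN).map (fun c =>
          if row.getD c ' ' = '^' then
            (if 0 < c then nxt.getD (c - 1) 0 else 0) +
            (if c + 1 < WN then nxt.getD (c + 1) 0 else 0)
          else nxt.getD c 0) := by
  unfold pvStepB
  rw [PySem.List.pyRange_zero_natCast, List.foldl_map]
  have hbody : ∀ (cur : List Int), ∀ c ∈ List.range WN,
      (fun (cur : List Int) (c : Int) =>
        let ch := if c < (row.length : Int) then PySem.List.pyGetD row c ' ' else ' '
        if ch = '^' then
          cur ++ [(if 0 < c then PySem.List.pyGetD nxt (c - 1) 0 else 0) +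
                  (if c + 1 < (WN : Int) then PySem.List.pyGetD nxt (c + 1) 0 else 0)]
        else cur ++ [PySem.List.pyGetD nxt c 0]) cur ((fun (k : Nat) => (k : Int)) c)
      = cur ++ [if row.getD c ' ' = '^' then
            (if 0 < c then nxt.getD (c - 1) 0 else 0) +
            (if c + 1 < WN then nxt.getD (c + 1) 0 else 0)
          else nxt.getD c 0] := by
    intro cur c _
    simp only []
    have hch : (if (c : Int) < (row.length : Int) then PySem.List.pyGetD row (c : Int) ' ' else ' ')
        = row.getD c ' ' := by
      by_cases h : c < row.length
      · rw [if_pos (by exact_mod_cast h : (c : Int) < (row.length : Int)),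
          PySem.List.pyGetD_natCast]
      · rw [if_neg (by omega : ¬ ((c : Int) < (row.length : Int))),
          List.getD_eq_default _ _ (by omega)]
    rw [hch]
    by_cases hc : row.getD c ' ' = '^'
    · rw [if_pos hc, if_pos hc]
      have e1 : (if (0 : Int) < (c : Int) then PySem.List.pyGetD nxt ((c : Int) - 1) 0 else 0)
          = (if 0 < c then nxt.getD (c - 1) 0 else 0) := by
        by_cases h0 : 0 < c
        · rw [if_pos (by omega : (0 : Int) < (c : Int)), if_pos h0,
            show ((c : Int) - 1) = ((c - 1 : Nat) : Int) by omega, PySem.List.pyGetD_natCast]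
        · rw [if_neg (by omega : ¬ ((0 : Int) < (c : Int))), if_neg h0]
      have e2 : (if (c : Int) + 1 < (WN : Int) then PySem.List.pyGetD nxt ((c : Int) + 1) 0 else 0)
          = (if c + 1 < WN then nxt.getD (c + 1) 0 else 0) := by
        by_cases h1 : c + 1 < WN
        · rw [if_pos (by omega : (c : Int) + 1 < (WN : Int)), if_pos h1,
            show ((c : Int) + 1) = ((c + 1 : Nat) : Int) by push_cast; ring,
            PySem.List.pyGetD_natCast]
        · rw [if_neg (by omega : ¬ ((c : Int) + 1 < (WN : Int))), if_neg h1]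
      rw [e1, e2]
    · rw [if_neg hc, if_neg hc, PySem.List.pyGetD_natCast]
  rw [PySem.List.foldl_congr_mem _ _ _ _ hbody]
  rw [PySem.List.foldl_append_singleton_eq_map]
  rfl

lemma pvBfold (lines : List String) (WN srN : Nat) (hsr : srN ≤ lines.length - 1)
    (hone : 1 ≤ lines.length) :
    ∀ (m a : Nat), a = srN + m → a ≤ lines.length - 1 →
      (PySem.List.pyRange ((a : Int) - 1) ((srN : Int) - 1) (-1)).foldl
          (fun nxt r => pvStepB (PySem.List.pyGetD lines (r + 1) "").toList (WN : Int) nxt)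
          ((List.range WN).map (fun c => pvF lines WN (lines.length - 1 - a) c))
        = (List.range WN).map (fun c => pvF lines WN (lines.length - 1 - srN) c) := by
  intro m
  induction m with
  | zero =>
    intro a ha _
    subst ha
    rw [PySem.List.pyRange_neg_one_eq_nil (le_refl _)]
    simp
  | succ m ih =>
    intro a ha hle
    have ha1 : 1 ≤ a := by omega
    rw [PySem.List.pyRange_neg_one_cons (by omega : ((srN : Int) - 1) < ((a : Int) - 1)),
      List.foldl_cons]
    have hstep : pvStepB (PySem.List.pyGetD lines ((a : Int) - 1 + 1) "").toList (WN : Int)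
          ((List.range WN).map (fun c => pvF lines WN (lines.length - 1 - a) c))
        = (List.range WN).map (fun c => pvF lines WN (lines.length - 1 - (a - 1)) c) := by
      rw [show ((a : Int) - 1 + 1) = ((a : Nat) : Int) by ring, PySem.List.pyGetD_natCast]
      rw [pvStepB_eq]
      apply List.map_congr_left
      intro c hc
      have hcw : c < WN := List.mem_range.mp hc
      have hk1 : lines.length - 1 - (a - 1) = (lines.length - 1 - a) + 1 := by omega
      rw [hk1, pvF]
      have hidx : lines.length - 1 - (lines.length - 1 - a) = a := by omega
      rw [hidx]
      have hrow : ((lines.getD a "").toList).getD c ' ' = pvChL lines a c := rfl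
      rw [hrow]
      by_cases hch : pvChL lines a c = '^'
      · rw [if_pos hch, if_pos hch]
        congr 1
        · by_cases h0 : 0 < c
          · rw [if_pos h0, if_pos h0, PySem.List.getD_map_range _ _ _ _ (by omega)]
          · rw [if_neg h0, if_neg h0]
        · by_cases h1 : c + 1 < WN
          · rw [if_pos h1, if_pos h1, PySem.List.getD_map_range _ _ _ _ (by omega)]
          · rw [if_neg h1, if_neg h1]
      · rw [if_neg hch, if_neg hch, PySem.List.getD_map_range _ _ _ _ hcw]
    rw [hstep]
    rw [show ((a : Int) - 1 - 1) = (((a - 1 : Nat)) : Int) - 1 by omega]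
    exact ih (a - 1) (by omega) (by omega)

-- ---- each port equals the common closed form ----

lemma pvA_eq (text : String) (lines : List String)
    (hl : PySem.Str.splitlines text = lines) (hne : lines ≠ []) :
    solve_quantum text = pvRes lines := by
  unfold solve_quantum
  rw [hl, if_neg hne]
  simp only []
  have hle : ∀ l ∈ lines, l.toList.length ≤ pvWN lines := fun l hl' => pvWN_ge lines hne hl'
  have hw : (PySem.List.max? ((lines.map (fun line => line.toList)).map
        (fun row => (row.length : Int))) (fun x => x)).getD 0 = ((pvWN lines : Nat) : Int) := by
    rw [pvWN_cast lines hne]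
    unfold pvWI
    rw [List.map_map]
    rfl
  rw [hw]
  have hglen : ((lines.map (fun line => line.toList)).length : Int) = ((lines.length : Nat) : Int) := by
    simp
  rw [hglen]
  rw [pvPadLoopA_eq lines _ (pvWN lines) rfl hle]
  rw [pvFindA_eq lines (pvWN lines) hle]
  unfold pvRes
  cases hstart : pvStart lines with
  | none => rfl
  | some p =>
    obtain ⟨sr, sc⟩ := p
    obtain ⟨rN, kN, h1, h2, hrlt, hklt⟩ := pvStart_some lines sr sc hstart
    subst h1
    subst h2
    simp only [Int.toNat_natCast]
    have hkW : kN < pvWN lines := by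
      have hmem : lines.getD rN "" ∈ lines := by
        rw [List.getD_eq_getElem?_getD, List.getElem?_eq_getElem hrlt]
        exact List.getElem_mem hrlt
      have := hle _ hmem
      omega
    have hrowD : (List.replicate lines.length (List.replicate (pvWN lines) (0 : Int))).getD rN []
        = List.replicate (pvWN lines) 0 := by
      rw [pv_getD_replicate]
      rw [if_pos hrlt]
    rw [PySem.List.pyGetD_natCast, PySem.List.pySetD_natCast, PySem.List.pySetD_natCast, hrowD]
    apply pvOuter lines (pvWN lines)
      (pvF lines (pvWN lines) (lines.length - 1 - rN) kN) (lines.length - rN) rN _ (by omega)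
    · constructor
      · simp
      · intro row hrow
        rcases List.mem_or_eq_of_mem_set hrow with hmem | heq
        · rw [List.eq_of_mem_replicate hmem]
          simp
        · rw [heq, List.length_set]
          simp
    · intro r' c' hgt
      rw [pvG_dp1 lines.length (pvWN lines) rN kN hrlt hkW]
      simp [show ¬ (r' = rN ∧ c' = kN) by omega]
    · rw [if_pos hrlt]
      have hsum : ∀ c ∈ Finset.range (pvWN lines),
          pvG ((List.replicate lines.length (List.replicate (pvWN lines) (0 : Int))).set rN
              ((List.replicate (pvWN lines) 0).set kN 1)) rN c *
            pvF lines (pvWN lines) (lines.length - 1 - rN) c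
          = if c = kN then pvF lines (pvWN lines) (lines.length - 1 - rN) c else 0 := by
        intro c _
        rw [pvG_dp1 lines.length (pvWN lines) rN kN hrlt hkW]
        by_cases h : c = kN
        · simp [h]
        · simp [h]
      rw [Finset.sum_congr rfl hsum]
      rw [Finset.sum_ite_eq' (Finset.range (pvWN lines)) kN
          (fun c => pvF lines (pvWN lines) (lines.length - 1 - rN) c)]
      rw [if_pos (Finset.mem_range.mpr hkW)]
      ring

lemma pvB_eq (text : String) (lines : List String)
    (hl : PySem.Str.splitlines text = lines) (hne : lines ≠ []) :
    solve_quantum_alt text = pvRes lines := by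
  unfold solve_quantum_alt
  rw [hl, if_neg hne]
  simp only []
  have hw : (PySem.List.max? (lines.map (fun line => PySem.Str.len line)) (fun x => x)).getD 0
      = ((pvWN lines : Nat) : Int) := by
    rw [pvWN_cast lines hne]
    unfold pvWI
    rw [show lines.map (fun line => PySem.Str.len line)
        = lines.map (fun l => (l.toList.length : Int)) from
      List.map_congr_left (fun l _ => PySem.Str.len_eq l)]
  rw [hw]
  rw [pvFindB_eq lines]
  unfold pvRes
  cases hstart : pvStart lines with
  | none => rfl
  | some p =>
    obtain ⟨sr, sc⟩ := p
    obtain ⟨rN, kN, h1, h2, hrlt, hklt⟩ := pvStart_some lines sr sc hstart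
    subst h1
    subst h2
    simp only [Int.toNat_natCast]
    have hone : 1 ≤ lines.length := by
      cases lines with
      | nil => exact absurd rfl hne
      | cons a t => simp
    have hkW : kN < pvWN lines := by
      have hmem : lines.getD rN "" ∈ lines := by
        rw [List.getD_eq_getElem?_getD, List.getElem?_eq_getElem hrlt]
        exact List.getElem_mem hrlt
      have := pvWN_ge lines hne hmem
      omega
    have hinit : List.replicate (pvWN lines) (1 : Int)
        = (List.range (pvWN lines)).map
            (fun c => pvF lines (pvWN lines) (lines.length - 1 - (lines.length - 1)) c) := by
      rw [show lines.length - 1 - (lines.length - 1) = 0 by omega]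
      rw [show (fun c => pvF lines (pvWN lines) 0 c) = (fun _ : Nat => (1 : Int)) from
        funext (fun c => by rw [pvF])]
      rw [List.map_const', List.length_range]
    rw [hinit]
    rw [show ((lines.length : Int) - 2) = (((lines.length - 1 : Nat)) : Int) - 1 by omega]
    rw [pvBfold lines (pvWN lines) rN (by omega) hone (lines.length - 1 - rN)
        (lines.length - 1) (by omega) (le_refl _)]
    rw [PySem.List.pyGetD_natCast, PySem.List.getD_map_range _ _ _ _ hkW]

-- ===== VERDICT (by name: the statement is the Claim_ definition above) =====
theorem solve_quantum_spec : Claim_equal_solve_quantum := by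
  intro text _
  unfold Spec_solve_quantum
  by_cases hnil : PySem.Str.splitlines text = []
  · simp [solve_quantum, solve_quantum_alt, hnil]
  · rw [pvA_eq text _ rfl hnil, pvB_eq text _ rfl hnil]
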